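-- pv_equiv track=rewrite | github.com/AstrorEnales/advent-of-code | 2023-12-03/test_02.py | all_number_ranges
-- ===== SOURCE A (Python) =====
-- def all_number_ranges(line: str):
--     result = []
--     inside_number = False
--     for i in range(0, len(line)):
--         if line[i].isnumeric():
--             if inside_number:
--                 result[-1][1] = i
--             else:
--                 result.append([i, i])
--                 inside_number = True
--         else:
--             inside_number = False
--     return result
-- ===== SOURCE B (Python) =====
-- def all_number_ranges(line: str):
--     # Two-pointer run scan: jump over each digit run, append [start, end] once;
--     # no inside_number flag, no in-place mutation of the last range.
--     result = []
--     n = len(line)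
--     i = 0
--     while i < n:
--         if line[i].isnumeric():
--             j = i
--             while j + 1 < n and line[j + 1].isnumeric():
--                 j += 1
--             result.append([i, j])
--             i = j + 1
--         else:
--             i += 1
--     return result
-- ===== Notes on version B (the rewrite author's own statement) =====
-- stated objective: alternative
-- what changed: Replaced A's per-character state machine (inside_number flag plus in-place mutation of the last range's end) by a two-pointer run scan that finds each digit run's end with an inner scan and appends the finished [start,end] once.
import Mathlib
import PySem

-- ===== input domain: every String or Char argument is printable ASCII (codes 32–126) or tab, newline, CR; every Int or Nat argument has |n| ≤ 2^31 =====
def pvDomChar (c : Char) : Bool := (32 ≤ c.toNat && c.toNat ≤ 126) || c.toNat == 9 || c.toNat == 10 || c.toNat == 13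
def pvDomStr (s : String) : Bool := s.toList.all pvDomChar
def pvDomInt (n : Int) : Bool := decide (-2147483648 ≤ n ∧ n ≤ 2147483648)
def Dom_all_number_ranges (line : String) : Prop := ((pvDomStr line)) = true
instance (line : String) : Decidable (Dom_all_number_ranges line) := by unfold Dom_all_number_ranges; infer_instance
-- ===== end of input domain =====

-- B is an alternative run-scan (two pointers) instead of A's flag-and-mutate state machine; same O(n) cost.

-- ===== PORT A =====
-- str.isnumeric: exact on the ASCII domain (where it coincides with isdigit)
def pvIsNum (c : Char) : Bool := PySem.Chars.isdigit c

-- Python's result[-1][1] = i  (result's last element gets index 1 set to i)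
def pvSetLast : List (List Int) → Int → List (List Int)
  | [], _ => []
  | [r], i => [r.set 1 i]
  | r :: rs, i => r :: pvSetLast rs i

-- the for-loop over range(0, len(line)) / line[i], as structural recursion carrying i
def pvALoop : List Char → Int → List (List Int) → Bool → List (List Int)
  | [], _, result, _ => result
  | c :: rest, i, result, inside =>
    if pvIsNum c then
      if inside then pvALoop rest (i + 1) (pvSetLast result i) true
      else pvALoop rest (i + 1) (result ++ [[i, i]]) true
    else pvALoop rest (i + 1) result false

def all_number_ranges (line : String) : List (List Int) :=
  pvALoop line.toList 0 [] false

-- ===== PORT B =====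
-- the inner while loop: advance j over the remaining digits, return the run's last index and the rest
def pvRunEnd : List Char → Int → Int × List Char
  | [], j => (j, [])
  | c :: rest, j => if pvIsNum c then pvRunEnd rest (j + 1) else (j, c :: rest)

theorem pvRunEnd_len : ∀ (cs : List Char) (j : Int), (pvRunEnd cs j).2.length ≤ cs.length := by
  intro cs
  induction cs with
  | nil => intro j; simp [pvRunEnd]
  | cons c rest ih =>
    intro j
    simp only [pvRunEnd]
    split
    · exact le_trans (ih (j + 1)) (by simp)
    · simp

-- the outer while loop: skip non-digits, emit one [start, end] per digit run
def pvBLoop : List Char → Int → List (List Int)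
  | [], _ => []
  | c :: rest, i =>
    if pvIsNum c then
      let p := pvRunEnd rest i
      [i, p.1] :: pvBLoop p.2 (p.1 + 1)
    else pvBLoop rest (i + 1)
termination_by cs => cs.length
decreasing_by
  · exact Nat.lt_succ_of_le (pvRunEnd_len rest i)
  · simp

def all_number_ranges_alt (line : String) : List (List Int) :=
  pvBLoop line.toList 0

-- ===== PRECONDITION & SPEC =====
def Spec_all_number_ranges (line : String) (out : List (List Int)) : Prop := out = all_number_ranges_alt line
instance (line : String) (out : List (List Int)) : Decidable (Spec_all_number_ranges line out) := by unfold Spec_all_number_ranges; infer_instance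

-- ===== CLAIM (what is proved, stated in full; the proofs are below) =====
def Claim_equal_all_number_ranges : Prop := ∀ (line : String), Dom_all_number_ranges line → Spec_all_number_ranges line (all_number_ranges line)

-- ===== LEMMAS AND PROOFS =====

theorem pvSetLast_append (res : List (List Int)) (a b i : Int) :
    pvSetLast (res ++ [[a, b]]) i = res ++ [[a, i]] := by
  induction res with
  | nil => simp [pvSetLast, List.set]
  | cons r rs ih =>
    cases rs with
    | nil => simp [pvSetLast, List.set]
    | cons r' rs' => simpa [pvSetLast] using ih

-- once inside a run whose recorded end is j, A finishes the run exactly where pvRunEnd says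
theorem pvALoop_inside : ∀ (cs : List Char) (j : Int) (res : List (List Int)) (a : Int),
    pvALoop cs (j + 1) (res ++ [[a, j]]) true
      = pvALoop (pvRunEnd cs j).2 ((pvRunEnd cs j).1 + 1) (res ++ [[a, (pvRunEnd cs j).1]]) false := by
  intro cs
  induction cs with
  | nil => intro j res a; simp [pvALoop, pvRunEnd]
  | cons c rest ih =>
    intro j res a
    by_cases h : pvIsNum c
    · simp only [pvALoop, pvRunEnd, h, if_true, pvSetLast_append]
      exact ih (j + 1) res a
    · simp [pvALoop, pvRunEnd, h]

theorem pvALoop_eq_pvBLoop : ∀ (n : Nat) (cs : List Char), cs.length ≤ n →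
    ∀ (i : Int) (res : List (List Int)), pvALoop cs i res false = res ++ pvBLoop cs i := by
  intro n
  induction n with
  | zero =>
    intro cs h i res
    have : cs = [] := List.eq_nil_of_length_eq_zero (Nat.le_zero.mp h)
    subst this; simp [pvALoop, pvBLoop]
  | succ n ih =>
    intro cs h i res
    cases cs with
    | nil => simp [pvALoop, pvBLoop]
    | cons c rest =>
      by_cases hd : pvIsNum c
      · simp only [pvALoop, hd, if_true]
        rw [pvALoop_inside rest i res i]
        have hlen : (pvRunEnd rest i).2.length ≤ n :=
          le_trans (pvRunEnd_len rest i) (Nat.lt_succ_iff.mp (Nat.lt_of_lt_of_le (Nat.lt_succ_of_le (Nat.le_refl _)) h))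
        rw [ih _ hlen]
        simp [pvBLoop, hd]
      · simp only [pvALoop, hd]
        rw [ih rest (by simpa using Nat.lt_succ_iff.mp (Nat.lt_of_lt_of_le (Nat.lt_succ_of_le (Nat.le_refl _)) h))]
        simp [pvBLoop, hd]

-- ===== VERDICT (by name: the statement is the Claim_ definition above) =====
theorem all_number_ranges_spec : Claim_equal_all_number_ranges := by
  intro line _
  unfold Spec_all_number_ranges all_number_ranges all_number_ranges_alt
  simpa using pvALoop_eq_pvBLoop line.toList.length line.toList (Nat.le_refl _) 0 []
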